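-- pv_equiv track=rewrite | github.com/spacexerq/optimization | 1d_optimize/optimization.py | p_func_min
-- ===== SOURCE A (Python) =====
-- def p_func_min(p):
--     pl_min = p[0][0]
--     xl_min = p[1][0]
--     for j in range(len(p[0])):
--         if p[0][j] < pl_min:
--             pl_min = p[0][j]
--             xl_min = p[1][j]
--     return xl_min, pl_min
-- ===== SOURCE B (Python) =====
-- def p_func_min(p):
--     pl_min = min(p[0])
--     return p[1][p[0].index(pl_min)], pl_min
-- ===== Notes on version B (the rewrite author's own statement) =====
-- stated objective: simpler
-- what changed: Replaces A's fused index loop carrying two running variables with min() to get the smallest p[0] value and list.index() to locate its first position, then a single lookup in p[1].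
import Mathlib
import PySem

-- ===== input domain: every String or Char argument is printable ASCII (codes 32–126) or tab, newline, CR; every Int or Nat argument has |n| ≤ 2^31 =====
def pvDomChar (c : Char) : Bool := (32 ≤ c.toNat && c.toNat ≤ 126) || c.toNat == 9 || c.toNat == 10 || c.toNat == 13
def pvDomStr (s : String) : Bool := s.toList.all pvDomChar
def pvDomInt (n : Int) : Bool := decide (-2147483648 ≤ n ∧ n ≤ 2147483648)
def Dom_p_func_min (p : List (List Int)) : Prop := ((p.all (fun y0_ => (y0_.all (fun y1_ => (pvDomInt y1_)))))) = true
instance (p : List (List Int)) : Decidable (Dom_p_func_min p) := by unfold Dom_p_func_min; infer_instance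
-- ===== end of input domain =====

-- ===== PORT A =====
-- B computes min(p[0]) then its first index, instead of A's fused scan; objective: simpler.
def p_func_min (p : List (List Int)) : Int × Int :=
  let p0 := (PySem.List.pyGet? p 0).getD []
  let p1 := (PySem.List.pyGet? p 1).getD []
  let pl0 := (PySem.List.pyGet? p0 0).getD 0
  let xl0 := (PySem.List.pyGet? p1 0).getD 0
  let st := (PySem.List.pyRange 0 (PySem.List.len p0) 1).foldl
    (fun (st : Int × Int) j =>
      if PySem.List.pyGetD p0 j 0 < st.1 then
        (PySem.List.pyGetD p0 j 0, PySem.List.pyGetD p1 j 0)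
      else st)
    (pl0, xl0)
  (st.2, st.1)

-- ===== PORT B =====
def p_func_min_alt (p : List (List Int)) : Int × Int :=
  let p0 := (PySem.List.pyGet? p 0).getD []
  let p1 := (PySem.List.pyGet? p 1).getD []
  let pl_min := (PySem.List.min? p0 (fun y => y)).getD 0
  let idx := (PySem.List.index? p0 pl_min).getD 0
  ((PySem.List.pyGetD p1 (idx : Int) 0), pl_min)

-- ===== PRECONDITION & SPEC =====
-- Pre_ excludes exactly the inputs where the Python A raises IndexError: fewer than two rows,
-- an empty p[0], or the first minimum of p[0] sitting at an index beyond the end of p[1].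
def Pre_p_func_min (p : List (List Int)) : Prop :=
  2 ≤ p.length ∧ p.headI ≠ [] ∧
    ((PySem.List.index? p.headI ((PySem.List.min? p.headI (fun y => y)).getD 0)).getD
        p.tail.headI.length) < p.tail.headI.length
instance (p : List (List Int)) : Decidable (Pre_p_func_min p) := by unfold Pre_p_func_min; infer_instance
def pvWitness_p_func_min : List (List Int) := [[3, 1, 2], [10, 20, 30]]
def Spec_p_func_min (p : List (List Int)) (out : Int × Int) : Prop := out = p_func_min_alt p
instance (p : List (List Int)) (out : Int × Int) : Decidable (Spec_p_func_min p out) := by unfold Spec_p_func_min; infer_instance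

-- ===== CLAIM (what is proved, stated in full; the proofs are below) =====
def Claim_equal_p_func_min : Prop := ∀ (p : List (List Int)), Dom_p_func_min p → Pre_p_func_min p → Spec_p_func_min p (p_func_min p)

-- ===== LEMMAS AND PROOFS =====

theorem pv_foldl_min_le (t : List Int) : ∀ (m : Int), t.foldl min m ≤ m := by
  induction t with
  | nil => intro m; exact le_refl m
  | cons a t ih =>
    intro m
    rw [List.foldl_cons]
    exact le_trans (ih (min m a)) (min_le_left m a)

-- invariant of A's loop, stated over 'enumerate' with an arbitrary start offset and state
theorem pv_loop_char (p1 : List Int) (l : List Int) : ∀ (s : Int) (m x : Int),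
    (PySem.List.enumerate l s).foldl
      (fun (st : Int × Int) q =>
        if q.2 < st.1 then (q.2, PySem.List.pyGetD p1 q.1 0) else st) (m, x)
    = (l.foldl min m,
       if l.foldl min m = m then x
       else PySem.List.pyGetD p1 (s + (List.idxOf (l.foldl min m) l : Int)) 0) := by
  induction l with
  | nil => intro s m x; simp [PySem.List.enumerate_nil]
  | cons a t ih =>
    intro s m x
    rw [PySem.List.enumerate_cons, List.foldl_cons, List.foldl_cons]
    by_cases hlt : a < m
    · rw [if_pos hlt, ih, min_eq_right (le_of_lt hlt)]
      have hMle : t.foldl min a ≤ a := pv_foldl_min_le t a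
      have hMm : t.foldl min a ≠ m := ne_of_lt (lt_of_le_of_lt hMle hlt)
      rw [Prod.mk.injEq]
      refine ⟨rfl, ?_⟩
      rw [if_neg hMm]
      by_cases hMa : t.foldl min a = a
      · rw [if_pos hMa, hMa, List.idxOf_cons_self]
        simp
      · rw [if_neg hMa, List.idxOf_cons_ne t (fun hc => hMa hc.symm)]
        congr 1
        push_cast [Nat.succ_eq_add_one]
        ring
    · rw [if_neg hlt, ih, min_eq_left (le_of_not_gt hlt)]
      rw [Prod.mk.injEq]
      refine ⟨rfl, ?_⟩
      by_cases hMm : t.foldl min m = m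
      · rw [if_pos hMm, if_pos hMm]
      · rw [if_neg hMm, if_neg hMm]
        have hMa : a ≠ t.foldl min m := by
          intro hc
          have h1 : t.foldl min m ≤ m := pv_foldl_min_le t m
          have h2 : t.foldl min m < m := lt_of_le_of_ne h1 hMm
          exact hlt (hc ▸ h2)
        rw [List.idxOf_cons_ne t hMa]
        congr 1
        push_cast [Nat.succ_eq_add_one]
        ring

theorem pv_idxOf?_of_mem (l : List Int) (v : Int) (h : v ∈ l) : l.idxOf? v = some (l.idxOf v) := by
  induction l with
  | nil => cases h
  | cons a t ih =>
    by_cases hv : a = v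
    · subst hv; simp [List.idxOf?_cons, List.idxOf_cons_self]
    · cases h with
      | head => exact absurd rfl hv
      | tail _ h => simp [List.idxOf?_cons, hv, ih h, List.idxOf_cons_ne t (by exact hv)]

theorem pv_foldl_min_mem (t : List Int) : ∀ (m : Int), t.foldl min m = m ∨ t.foldl min m ∈ t := by
  induction t with
  | nil => intro m; exact Or.inl rfl
  | cons a t ih =>
    intro m
    rw [List.foldl_cons]
    rcases le_total m a with hma | ham
    · rw [min_eq_left hma]
      rcases ih m with h | h
      · exact Or.inl h
      · exact Or.inr (List.mem_cons_of_mem a h)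
    · rw [min_eq_right ham]
      rcases ih a with h | h
      · refine Or.inr ?_; rw [h]; exact List.mem_cons_self
      · exact Or.inr (List.mem_cons_of_mem a h)

-- the core equality, stated over the two rows directly
theorem pv_core (p0 p1 : List Int) :
    (((PySem.List.pyRange 0 (PySem.List.len p0) 1).foldl
        (fun (st : Int × Int) j =>
          if PySem.List.pyGetD p0 j 0 < st.1 then
            (PySem.List.pyGetD p0 j 0, PySem.List.pyGetD p1 j 0)
          else st)
        ((PySem.List.pyGet? p0 0).getD 0, (PySem.List.pyGet? p1 0).getD 0)).2,
     ((PySem.List.pyRange 0 (PySem.List.len p0) 1).foldl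
        (fun (st : Int × Int) j =>
          if PySem.List.pyGetD p0 j 0 < st.1 then
            (PySem.List.pyGetD p0 j 0, PySem.List.pyGetD p1 j 0)
          else st)
        ((PySem.List.pyGet? p0 0).getD 0, (PySem.List.pyGet? p1 0).getD 0)).1)
    = (PySem.List.pyGetD p1
        (((PySem.List.index? p0 ((PySem.List.min? p0 (fun y => y)).getD 0)).getD 0 : Nat) : Int) 0,
       (PySem.List.min? p0 (fun y => y)).getD 0) := by
  cases p0 with
  | nil => simp [PySem.List.pyRange, PySem.List.min?, PySem.List.index?, PySem.List.pyGetD, PySem.List.pyGet?, PySem.List.pyIdx?]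
  | cons h t =>
    have e1 : (PySem.List.pyRange 0 (PySem.List.len (h :: t)) 1).foldl
        (fun (st : Int × Int) j =>
          if PySem.List.pyGetD (h :: t) j 0 < st.1 then
            (PySem.List.pyGetD (h :: t) j 0, PySem.List.pyGetD p1 j 0)
          else st)
        ((PySem.List.pyGet? (h :: t) 0).getD 0, (PySem.List.pyGet? p1 0).getD 0)
        = (PySem.List.enumerate (h :: t) 0).foldl
        (fun (st : Int × Int) q =>
          if q.2 < st.1 then (q.2, PySem.List.pyGetD p1 q.1 0) else st)
        ((PySem.List.pyGet? (h :: t) 0).getD 0, (PySem.List.pyGet? p1 0).getD 0) := by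
      rw [PySem.List.enumerate_eq_map_pyRange (h :: t) 0, List.foldl_map]
    rw [e1, pv_loop_char p1 (h :: t) 0]
    have hM : (h :: t).foldl min h = t.foldl min h := by
      rw [List.foldl_cons, min_self]
    have hmem : t.foldl min h ∈ h :: t := by
      rcases pv_foldl_min_mem t h with hc | hc
      · rw [hc]; exact List.mem_cons_self
      · exact List.mem_cons_of_mem h hc
    have hidx : (PySem.List.index? (h :: t) (t.foldl min h)).getD 0
        = List.idxOf (t.foldl min h) (h :: t) := by
      rw [PySem.List.index?_eq_idxOf?, pv_idxOf?_of_mem _ _ hmem, Option.getD_some]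
    rw [PySem.List.min?_id_cons, Option.getD_some, hidx, PySem.List.pyGet?_zero_cons,
      Option.getD_some, hM, Prod.mk.injEq]
    refine ⟨?_, rfl⟩
    by_cases hMh : t.foldl min h = h
    · rw [if_pos hMh, hMh, List.idxOf_cons_self]
      simp [PySem.List.pyGetD]
    · rw [if_neg hMh]
      norm_num

-- the two ports agree on every input (both fall back to the same defaults where Python would raise)
theorem pv_ports_eq (p : List (List Int)) : p_func_min p = p_func_min_alt p := by
  unfold p_func_min p_func_min_alt
  exact pv_core ((PySem.List.pyGet? p 0).getD []) ((PySem.List.pyGet? p 1).getD [])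

-- ===== VERDICT (by name: the statement is the Claim_ definition above) =====
theorem p_func_min_spec : Claim_equal_p_func_min := by
  intro p _ _
  unfold Spec_p_func_min
  exact pv_ports_eq p
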